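-- pv_equiv track=rewrite | github.com/rubenhortas/python_examples | cryptography/vigenere_decrypter.py | _get_coincidences
-- ===== SOURCE A (Python) =====
-- def _get_coincidences(ciphertext: str, ciphertext_length: int) -> list:
--     """
--     Finding coincidences
--     Rotate the ciphertext from 1 to n positions to the right and count the character matches with the original ciphertext by position.
--     For instance:
--        CT: ABCABCABC
--     RCT 1:  ABCABCAB Coincidences = 0
--     RCT 2:   ABCABCA Coincidences = 0
--     RCT 3:    ABCABC Coincidences = 6
--
--     :param ciphertext: Ciphertext.
--     :param ciphertext_length: Ciphertext_length.
--     :return: List with the number of coincidences for each rotation.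
--     """
--     max_length = ciphertext_length - 1
--     coincidences = []
--
--     for i in range(max_length):
--         comparison_chars = ciphertext[:(max_length - i)]  # Rotated ciphertext
--         comparison_chars_length = len(comparison_chars)
--         coincidences_sum = 0
--
--         for j in range(comparison_chars_length):
--             if ciphertext[j + i + 1] == comparison_chars[j]:
--                 coincidences_sum = coincidences_sum + 1
--
--         coincidences.append(coincidences_sum)
--
--     return coincidences
-- ===== SOURCE B (Python) =====
-- def _get_coincidences(ciphertext: str, ciphertext_length: int) -> list:
--     """
--     Histogram of pair distances among equal characters.
--
--     Instead of re-scanning the text for every rotation, index the positions of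
--     each character once; only pairs of EQUAL characters can coincide, and a pair
--     at positions p < q contributes exactly one coincidence to rotation q - p.
--     """
--     coincidences = [0] * (ciphertext_length - 1)
--     positions = {}
--     for idx in range(min(ciphertext_length, len(ciphertext))):
--         positions.setdefault(ciphertext[idx], []).append(idx)
--     for plist in positions.values():
--         prev = []
--         for q in plist:
--             for p in prev:
--                 coincidences[q - p - 1] += 1
--             prev.append(q)
--     return coincidences
-- ===== Notes on version B (the rewrite author's own statement) =====
-- stated objective: faster
-- what changed: Instead of comparing the text against each of its n rotations position by position, B builds a dictionary mapping each character to its list of positions once and then increments a histogram of pair distances over pairs of equal characters only, so no character comparison is ever performed between unequal characters.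
import Mathlib
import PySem

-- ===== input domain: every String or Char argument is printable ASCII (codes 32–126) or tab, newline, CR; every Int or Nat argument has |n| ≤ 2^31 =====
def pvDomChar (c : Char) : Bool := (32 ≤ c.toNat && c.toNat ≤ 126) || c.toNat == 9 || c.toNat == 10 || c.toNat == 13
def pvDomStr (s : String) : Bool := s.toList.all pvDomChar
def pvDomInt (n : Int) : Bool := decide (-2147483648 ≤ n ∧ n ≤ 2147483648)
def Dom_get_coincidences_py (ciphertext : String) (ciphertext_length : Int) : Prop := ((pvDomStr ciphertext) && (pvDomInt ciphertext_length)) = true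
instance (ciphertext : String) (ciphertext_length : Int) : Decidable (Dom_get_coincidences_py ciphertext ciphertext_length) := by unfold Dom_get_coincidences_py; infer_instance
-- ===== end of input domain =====

-- B replaces the per-rotation rescans of A by one positions-per-character index and a
-- histogram of pair distances over equal-character pairs (measurably faster; same results).

-- ===== PORT A =====
def get_coincidences_py (ciphertext : String) (ciphertext_length : Int) : List Int :=
  let max_length := ciphertext_length - 1
  (PySem.List.pyRange 0 max_length 1).foldl (fun coincidences i =>
    let comparison_chars := PySem.Str.slice ciphertext none (some (max_length - i))
    let comparison_chars_length := PySem.Str.len comparison_chars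
    let coincidences_sum := (PySem.List.pyRange 0 comparison_chars_length 1).foldl (fun acc j =>
      if PySem.Str.pyGet? ciphertext (j + i + 1) == PySem.Str.pyGet? comparison_chars j then acc + 1 else acc) 0
    coincidences ++ [coincidences_sum]) []

-- ===== PORT B =====
def get_coincidences_py_alt (ciphertext : String) (ciphertext_length : Int) : List Int :=
  let cs := ciphertext.toList
  let coincidences : List Int := PySem.List.pyRepeat [(0 : Int)] (ciphertext_length - 1)
  let positions : PySem.Dict Char (List Int) :=
    (PySem.List.pyRange 0 (min ciphertext_length (PySem.List.len cs)) 1).foldl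
      (fun d i => PySem.Dict.modify d (PySem.List.pyGetD cs i ' ') [] (fun ps => ps ++ [i]))
      PySem.Dict.empty
  positions.values.foldl (fun res ps =>
    (ps.foldl (fun (st : List Int × List Int) q =>
        (st.2.foldl (fun r p =>
            PySem.List.pySetD r (q - p - 1) (PySem.List.pyGetD r (q - p - 1) 0 + 1)) st.1,
         st.2 ++ [q])) (res, ([] : List Int))).1) coincidences

-- ===== PRECONDITION & SPEC =====
-- Pre_ excludes exactly the inputs on which A raises IndexError: a nonempty ciphertext with
-- ciphertext_length exceeding its real length (and ciphertext_length ≥ 2, so the loop runs).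
def Pre_get_coincidences_py (ciphertext : String) (ciphertext_length : Int) : Prop :=
  ciphertext_length ≤ 1 ∨ PySem.Str.len ciphertext = 0 ∨ ciphertext_length ≤ PySem.Str.len ciphertext
instance (ciphertext : String) (ciphertext_length : Int) : Decidable (Pre_get_coincidences_py ciphertext ciphertext_length) := by unfold Pre_get_coincidences_py; infer_instance
def pvWitness_get_coincidences_py : String × Int := ("ABCABCABC", 9)


def Spec_get_coincidences_py (ciphertext : String) (ciphertext_length : Int) (out : List Int) : Prop := out = get_coincidences_py_alt ciphertext ciphertext_length
instance (ciphertext : String) (ciphertext_length : Int) (out : List Int) : Decidable (Spec_get_coincidences_py ciphertext ciphertext_length out) := by unfold Spec_get_coincidences_py; infer_instance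

-- ===== CLAIM (what is proved, stated in full; the proofs are below) =====
def Claim_equal_get_coincidences_py : Prop := ∀ (ciphertext : String) (ciphertext_length : Int), Dom_get_coincidences_py ciphertext ciphertext_length → Pre_get_coincidences_py ciphertext ciphertext_length → Spec_get_coincidences_py ciphertext ciphertext_length (get_coincidences_py ciphertext ciphertext_length)

-- ===== LEMMAS AND PROOFS =====

-- `coincidences[e] += 1` as one step, and a whole sequence of such increment events.
def pvBump (r : List Int) (e : Int) : List Int :=
  PySem.List.pySetD r e (PySem.List.pyGetD r e 0 + 1)
def pvScat (r : List Int) (es : List Int) : List Int := es.foldl pvBump r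

-- The increment events produced by B's inner two loops on one position list `ps`
-- (with `pre` the already-seen prefix).
def pvPev : List Int → List Int → List Int
  | _, [] => []
  | pre, q :: t => pre.map (fun p => q - p - 1) ++ pvPev (pre ++ [q]) t

-- The position list B's dictionary stores for character c after scanning cs[0:K].
def pvGrp (cs : List Char) (K : Nat) (c : Char) : List Int :=
  List.map (fun (j : Nat) => (j : Int)) ((List.range K).filter (fun j => cs.getD j ' ' == c))

-- All increment events of B after scanning cs[0:K].
def pvE (cs : List Char) (K : Nat) : List Int :=
  (PySem.List.dedup (cs.take K)).flatMap (fun c => pvPev [] (pvGrp cs K c))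

-- Number of equal-character pairs of cs[0:K] at distance i+1.
def pvCnt (cs : List Char) (K i : Nat) : Nat :=
  (List.range K).countP (fun q => decide (i + 1 ≤ q) && (cs.getD (q - i - 1) ' ' == cs.getD q ' '))

theorem pvBump_length (r : List Int) (e : Int) : (pvBump r e).length = r.length := by
  unfold pvBump
  exact PySem.List.length_pySetD _ _ _

theorem pvScat_length (r es : List Int) : (pvScat r es).length = r.length := by
  induction es generalizing r with
  | nil => rfl
  | cons e t ih => simp only [pvScat, List.foldl_cons] at *; rw [ih, pvBump_length]

theorem pvBump_getD (r : List Int) (e : Int) (he : 0 ≤ e) (i : Nat) :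
    (pvBump r e).getD i 0 = if (i : Int) = e ∧ i < r.length then r.getD i 0 + 1 else r.getD i 0 := by
  unfold pvBump
  rw [PySem.List.pySetD_of_nonneg _ _ he]
  rcases Nat.lt_or_ge i r.length with hi | hi
  · by_cases hie : (i : Int) = e
    · have : e.toNat = i := by omega
      subst this
      simp only [hie, hi, and_self, if_true]
      rw [List.getD_eq_getElem _ _ (by simpa using hi), List.getD_eq_getElem _ _ hi]
      rw [List.getElem_set_self (by simpa using hi)]
      congr 1
      rw [PySem.List.pyGetD_of_nonneg _ _ he, List.getD_eq_getElem?_getD]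
      simp [List.getElem?_eq_getElem hi]
    · simp only [hie, false_and, if_false]
      rw [List.getD_eq_getElem _ _ (by simpa using hi), List.getD_eq_getElem _ _ hi]
      rw [List.getElem_set_ne (by omega)]
  · simp only [Nat.not_lt.mpr hi, and_false, if_false]
    rw [List.getD_eq_getElem?_getD, List.getD_eq_getElem?_getD]
    rw [List.getElem?_eq_none (by simpa using hi), List.getElem?_eq_none (by omega)]

theorem pvScat_getD (es : List Int) (r : List Int) (hes : ∀ e ∈ es, 0 ≤ e) (i : Nat) (hi : i < r.length) :
    (pvScat r es).getD i 0 = r.getD i 0 + (es.count (i : Int) : Int) := by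
  induction es generalizing r with
  | nil => simp [pvScat]
  | cons e t ih =>
    simp only [pvScat, List.foldl_cons] at *
    have he : (0:Int) ≤ e := hes e (by simp)
    rw [ih (pvBump r e) (fun x hx => hes x (List.mem_cons_of_mem _ hx))
      (by rw [pvBump_length]; exact hi)]
    rw [pvBump_getD _ _ he, List.count_cons]
    by_cases hie : e = (i : Int)
    · simp [hie, hi]; ring
    · simp [hie, Ne.symm hie]

theorem pvPev_snoc (pre ps : List Int) (q : Int) :
    pvPev pre (ps ++ [q]) = pvPev pre ps ++ (pre ++ ps).map (fun p => q - p - 1) := by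
  induction ps generalizing pre with
  | nil => simp [pvPev]
  | cons q' t ih =>
    simp only [List.cons_append, pvPev, ih, List.append_assoc, List.nil_append]

theorem pvPev_nonneg (ps pre : List Int) (hmono : ∀ p ∈ pre, ∀ q ∈ ps, p < q)
    (hps : ps.Pairwise (· < ·)) : ∀ e ∈ pvPev pre ps, 0 ≤ e := by
  induction ps generalizing pre with
  | nil => intro e he; simp [pvPev] at he
  | cons q t ih =>
    intro e he
    simp only [pvPev, List.mem_append, List.mem_map] at he
    rcases he with ⟨p, hp, rfl⟩ | he
    · have := hmono p hp q (by simp)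
      omega
    · rcases List.pairwise_cons.mp hps with ⟨hq, ht⟩
      refine ih (pre ++ [q]) ?_ ht e he
      intro p hp q' hq'
      rcases List.mem_append.mp hp with hp | hp
      · exact lt_trans (hmono p hp q (by simp)) (hq q' hq')
      · simp at hp; subst hp; exact hq q' hq'

theorem pvGrp_pairwise (cs : List Char) (K : Nat) (c : Char) :
    (pvGrp cs K c).Pairwise (· < ·) := by
  unfold pvGrp
  exact List.Pairwise.map _ (fun a b h => by exact_mod_cast h)
    (List.pairwise_lt_range.filter _)

theorem pvInner_eq (ps : List Int) : ∀ (res pre : List Int),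
    (ps.foldl (fun (st : List Int × List Int) q =>
        (st.2.foldl (fun r p =>
            PySem.List.pySetD r (q - p - 1) (PySem.List.pyGetD r (q - p - 1) 0 + 1)) st.1,
         st.2 ++ [q])) (res, pre)) = (pvScat res (pvPev pre ps), pre ++ ps) := by
  induction ps with
  | nil => intro res pre; simp [pvPev, pvScat]
  | cons q t ih =>
    intro res pre
    simp only [List.foldl_cons]
    rw [ih]
    have hstep : pre.foldl (fun r p =>
        PySem.List.pySetD r (q - p - 1) (PySem.List.pyGetD r (q - p - 1) 0 + 1)) res
        = pvScat res (pre.map (fun p => q - p - 1)) := by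
      rw [pvScat, List.foldl_map]
      rfl
    rw [hstep]
    simp only [pvPev, pvScat, List.foldl_append, List.append_assoc, List.cons_append,
      List.nil_append]

theorem pvOuter_eq (vals : List (List Int)) (r0 : List Int) :
    vals.foldl (fun res ps =>
      (ps.foldl (fun (st : List Int × List Int) q =>
          (st.2.foldl (fun r p =>
              PySem.List.pySetD r (q - p - 1) (PySem.List.pyGetD r (q - p - 1) 0 + 1)) st.1,
           st.2 ++ [q])) (res, ([] : List Int))).1) r0
    = pvScat r0 (vals.flatMap (fun ps => pvPev [] ps)) := by
  induction vals generalizing r0 with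
  | nil => simp [pvScat]
  | cons ps t ih =>
    simp only [List.foldl_cons, List.flatMap_cons]
    rw [ih, pvInner_eq]
    simp [pvScat, List.foldl_append]

theorem pvGrp_succ (cs : List Char) (K : Nat) (c : Char) :
    pvGrp cs (K + 1) c = pvGrp cs K c ++ (if cs.getD K ' ' == c then [(K : Int)] else []) := by
  unfold pvGrp
  by_cases h : cs[K]?.getD ' ' = c <;>
    simp [List.range_succ, List.filter_append, h]


theorem pvFind_map {g : Char → List Int} (l : List Char) (c' : Char) :
    List.find? (fun p => p.1 == c') (l.map (fun c => (c, g c)))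
    = (l.find? (fun c => c == c')).map (fun c => (c, g c)) := by
  induction l with
  | nil => rfl
  | cons a t ih =>
    by_cases h : a = c'
    · subst h; simp
    · have hb : (a == c') = false := by simp [h]
      simp [hb, ih]

theorem pvFind_self (l : List Char) (c' : Char) :
    l.find? (fun c => c == c') = if c' ∈ l then some c' else none := by
  induction l with
  | nil => rfl
  | cons a t ih =>
    by_cases h : a = c'
    · subst h; simp
    · have hb : (a == c') = false := by simp [h]
      simp [hb, ih, Ne.symm h]

theorem pvGrp_nil (cs : List Char) (K : Nat) (hK : K ≤ cs.length) (c : Char)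
    (hc : c ∉ cs.take K) : pvGrp cs K c = [] := by
  unfold pvGrp
  have : (List.range K).filter (fun j => cs.getD j ' ' == c) = [] := by
    refine List.filter_eq_nil_iff.mpr ?_
    intro j hj
    have hjK : j < K := List.mem_range.mp hj
    have hjn : j < cs.length := by omega
    rw [List.getD_eq_getElem cs ' ' hjn]
    have hmem : cs[j] ∈ cs.take K := by
      have : (cs.take K)[j]'(by simp; omega) = cs[j] := List.getElem_take
      rw [← this]; exact List.getElem_mem _
    simp only [beq_iff_eq]
    intro hEq
    exact hc (hEq ▸ hmem)
  rw [this]; rfl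

theorem pvGrp_nodup (cs : List Char) (K : Nat) (c : Char) : (pvGrp cs K c).Nodup :=
  (pvGrp_pairwise cs K c).imp (fun h => ne_of_lt h)

theorem pvGrp_shift_count (cs : List Char) (K : Nat) (c : Char) (i : Nat) :
    ((pvGrp cs K c).map (fun p => (K : Int) - p - 1)).count (i : Int)
    = if i + 1 ≤ K ∧ cs.getD (K - i - 1) ' ' = c then 1 else 0 := by
  by_cases hcond : i + 1 ≤ K ∧ cs.getD (K - i - 1) ' ' = c
  · rw [if_pos hcond]
    obtain ⟨hc1, hc2⟩ := hcond
    rw [List.getD_eq_getElem?_getD] at hc2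
    have hmem : ((K : Int) - ((K - i - 1 : Nat) : Int) - 1) ∈
        (pvGrp cs K c).map (fun p => (K : Int) - p - 1) := by
      refine List.mem_map.mpr ⟨((K - i - 1 : Nat) : Int), ?_, rfl⟩
      unfold pvGrp
      refine List.mem_map.mpr ⟨K - i - 1, ?_, rfl⟩
      refine List.mem_filter.mpr ⟨List.mem_range.mpr (by omega), by simp [hc2]⟩
    have hval : ((K : Int) - ((K - i - 1 : Nat) : Int) - 1) = (i : Int) := by
      have : ((K - i - 1 : Nat) : Int) = (K : Int) - i - 1 := by omega
      rw [this]; ring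
    rw [hval] at hmem
    refine List.count_eq_one_of_mem ?_ hmem
    refine List.Nodup.map ?_ (pvGrp_nodup cs K c)
    intro a b hab
    have hab' : (K : Int) - a - 1 = (K : Int) - b - 1 := by simpa using hab
    omega
  · rw [if_neg hcond]
    refine List.count_eq_zero.mpr ?_
    intro hmem
    rcases List.mem_map.mp hmem with ⟨p, hp, hv⟩
    unfold pvGrp at hp
    rcases List.mem_map.mp hp with ⟨j, hj, rfl⟩
    have hjK : j < K := List.mem_range.mp (List.mem_filter.mp hj).1
    have hjc : cs.getD j ' ' = c := by
      have := (List.mem_filter.mp hj).2; simpa using this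
    have hv' : (K : Int) - (j : Int) - 1 = (i : Int) := by simpa using hv
    have hji : j = K - i - 1 ∧ i + 1 ≤ K := by omega
    exact hcond ⟨hji.2, by rw [← hji.1]; exact hjc⟩

theorem pvDict_items (cs : List Char) (K : Nat) (hK : K ≤ cs.length) :
    (List.map (fun (j : Nat) => (j : Int)) (List.range K)).foldl
      (fun d i => PySem.Dict.modify d (PySem.List.pyGetD cs i ' ') [] (fun ps => ps ++ [i]))
      (PySem.Dict.empty : PySem.Dict Char (List Int))
    = PySem.Dict.mk ((PySem.List.dedup (cs.take K)).map (fun c => (c, pvGrp cs K c))) := by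
  induction K with
  | zero => rfl
  | succ K ih =>
    have hK' : K ≤ cs.length := by omega
    have hKlt : K < cs.length := by omega
    rw [List.range_succ, List.map_append, List.foldl_append, ih hK']
    simp only [List.map_cons, List.map_nil, List.foldl_cons, List.foldl_nil]
    rw [PySem.List.pyGetD_natCast]
    set c' := cs.getD K ' ' with hc'
    have hc'' : c' = cs[K] := by rw [hc', List.getD_eq_getElem cs ' ' hKlt]
    have htake : cs.take (K + 1) = cs.take K ++ [cs[K]] := by
      rw [List.take_add_one]; simp [List.getElem?_eq_getElem hKlt]
    have hded : PySem.List.dedup (cs.take (K + 1))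
        = PySem.Set.add (PySem.List.dedup (cs.take K)) c' := by
      unfold PySem.List.dedup
      rw [htake, hc'', PySem.Set.ofList_eq_foldl, List.foldl_append, List.foldl_cons,
        List.foldl_nil, ← PySem.Set.ofList_eq_foldl]
    have hget : (PySem.Dict.mk ((PySem.List.dedup (cs.take K)).map
          (fun c => (c, pvGrp cs K c)))).getD c' []
        = if c' ∈ cs.take K then pvGrp cs K c' else [] := by
      unfold PySem.Dict.getD PySem.Dict.get?
      simp only [pvFind_map, pvFind_self]
      by_cases hmem : c' ∈ cs.take K <;>
        simp [PySem.List.dedup, PySem.Set.mem_ofList, hmem]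
    have hcont : (PySem.Dict.mk ((PySem.List.dedup (cs.take K)).map
          (fun c => (c, pvGrp cs K c)))).contains c'
        = decide (c' ∈ cs.take K) := by
      unfold PySem.Dict.contains
      simp [List.any_map, Function.comp_def, List.any_beq', PySem.List.dedup,
        PySem.Set.mem_ofList]
    unfold PySem.Dict.modify PySem.Dict.insert
    rw [hget, hcont, hded]
    have hmemded : ∀ c : Char, c ∈ PySem.List.dedup (cs.take K) ↔ c ∈ cs.take K := by
      intro c; exact PySem.Set.mem_ofList _ _
    by_cases hmem : c' ∈ cs.take K
    · have hsadd : PySem.Set.add (PySem.List.dedup (cs.take K)) c'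
          = PySem.List.dedup (cs.take K) := by
        unfold PySem.Set.add PySem.Set.contains
        rw [if_pos (by simp [hmem])]
      rw [hsadd]
      simp only [hmem, decide_true, if_true]
      congr 1
      rw [List.map_map]
      refine List.map_congr_left ?_
      intro c hcmem
      by_cases hcc : c = c'
      · subst hcc
        simp only [Function.comp_apply, BEq.rfl, if_true]
        rw [pvGrp_succ]
        have hb : (cs.getD K ' ' == c') = true := by rw [← hc']; simp
        rw [hb]
        simp
      · have hbeq : (c == c') = false := by simp [hcc]
        simp only [Function.comp_apply, hbeq, Bool.false_eq_true, if_false]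
        rw [pvGrp_succ]
        have hb : (cs.getD K ' ' == c) = false := by rw [← hc']; simp [Ne.symm hcc]
        rw [hb]
        simp
    · have hsadd : PySem.Set.add (PySem.List.dedup (cs.take K)) c'
          = PySem.List.dedup (cs.take K) ++ [c'] := by
        unfold PySem.Set.add PySem.Set.contains
        rw [if_neg (by simp [hmem])]
      rw [hsadd]
      simp only [hmem, decide_false, if_false, Bool.false_eq_true]
      congr 1
      rw [List.map_append]
      congr 1
      · refine List.map_congr_left ?_
        intro c hcmem
        have hcc : c ≠ c' := by
          intro h; exact hmem (h ▸ (hmemded c).mp hcmem)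
        rw [pvGrp_succ]
        have hb : (cs.getD K ' ' == c) = false := by rw [← hc']; simp [Ne.symm hcc]
        rw [hb]
        simp
      · simp only [List.map_cons, List.map_nil]
        rw [pvGrp_succ]
        have hb : (cs.getD K ' ' == c') = true := by rw [← hc']; simp
        rw [hb, pvGrp_nil cs K hK' c' hmem]
        simp

theorem pvGetD_mem_take (cs : List Char) (K j : Nat) (hK : K ≤ cs.length) (hj : j < K) :
    cs.getD j ' ' ∈ cs.take K := by
  have hjn : j < cs.length := by omega
  rw [List.getD_eq_getElem cs ' ' hjn]
  have : (cs.take K)[j]'(by simp; omega) = cs[j] := List.getElem_take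
  rw [← this]
  exact List.getElem_mem _

theorem pvDedup_succ (cs : List Char) (K : Nat) (hKlt : K < cs.length) :
    PySem.List.dedup (cs.take (K + 1))
    = if cs.getD K ' ' ∈ cs.take K then PySem.List.dedup (cs.take K)
      else PySem.List.dedup (cs.take K) ++ [cs.getD K ' '] := by
  have htake : cs.take (K + 1) = cs.take K ++ [cs[K]] := by
    rw [List.take_add_one]; simp [List.getElem?_eq_getElem hKlt]
  have hc : cs[K] = cs.getD K ' ' := (List.getD_eq_getElem cs ' ' hKlt).symm
  unfold PySem.List.dedup
  rw [htake, hc, PySem.Set.ofList_eq_foldl, List.foldl_append, List.foldl_cons,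
    List.foldl_nil, ← PySem.Set.ofList_eq_foldl]
  unfold PySem.Set.add PySem.Set.contains
  have hiff : List.contains (PySem.Set.ofList (cs.take K)) (cs.getD K ' ') = true
      ↔ cs.getD K ' ' ∈ cs.take K :=
    List.contains_iff_mem.trans (PySem.Set.mem_ofList _ _)
  by_cases hmem : cs.getD K ' ' ∈ cs.take K
  · rw [if_pos (hiff.mpr hmem), if_pos hmem]
  · rw [if_neg (fun h => hmem (hiff.mp h)), if_neg hmem]

theorem pvE_count (cs : List Char) (K : Nat) (hK : K ≤ cs.length) (i : Nat) :
    (pvE cs K).count (i : Int) = pvCnt cs K i := by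
  induction K with
  | zero => rfl
  | succ K ih =>
    have hK' : K ≤ cs.length := by omega
    have hKlt : K < cs.length := by omega
    -- the right-hand side gains the contribution of the new position K
    have hR : pvCnt cs (K + 1) i = pvCnt cs K i +
        (if i + 1 ≤ K ∧ cs.getD (K - i - 1) ' ' = cs.getD K ' ' then 1 else 0) := by
      unfold pvCnt
      rw [List.range_succ, List.countP_append, List.countP_singleton]
      congr 1
      show (if (decide (i + 1 ≤ K) && (cs.getD (K - i - 1) ' ' == cs.getD K ' ')) = true
          then 1 else 0) = _
      by_cases hc : i + 1 ≤ K ∧ cs.getD (K - i - 1) ' ' = cs.getD K ' '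
      · rw [if_pos (Bool.and_eq_true_iff.mpr ⟨decide_eq_true hc.1, beq_iff_eq.mpr hc.2⟩),
          if_pos hc]
      · rw [if_neg (fun h => hc ⟨of_decide_eq_true (Bool.and_eq_true_iff.mp h).1,
          beq_iff_eq.mp (Bool.and_eq_true_iff.mp h).2⟩), if_neg hc]
    rw [hR, ← ih hK']
    unfold pvE
    rw [List.count_flatMap, List.count_flatMap, pvDedup_succ cs K hKlt]
    set c' := cs.getD K ' ' with hc'
    have hF1 : ((pvPev [] (pvGrp cs (K + 1) c')).count (i : Int))
        = (pvPev [] (pvGrp cs K c')).count (i : Int) +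
          (if i + 1 ≤ K ∧ cs.getD (K - i - 1) ' ' = c' then 1 else 0) := by
      rw [pvGrp_succ]
      have hb : (cs.getD K ' ' == c') = true := by rw [← hc']; simp
      rw [hb]
      simp only [if_true]
      rw [pvPev_snoc, List.count_append, List.nil_append]
      congr 1
      exact pvGrp_shift_count cs K c' i
    have hFne : ∀ c : Char, c ≠ c' →
        (pvPev [] (pvGrp cs (K + 1) c)).count (i : Int)
        = (pvPev [] (pvGrp cs K c)).count (i : Int) := by
      intro c hcc
      rw [pvGrp_succ]
      have hb : (cs.getD K ' ' == c) = false := by rw [← hc']; simp [Ne.symm hcc]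
      rw [hb]
      simp
    by_cases hmem : c' ∈ cs.take K
    · rw [if_pos hmem]
      have hmemD : c' ∈ PySem.List.dedup (cs.take K) := by
        unfold PySem.List.dedup; exact (PySem.Set.mem_ofList _ _).mpr hmem
      obtain ⟨u, w, hsplit⟩ := List.append_of_mem hmemD
      have hnd : (u ++ c' :: w).Nodup := by
        rw [← hsplit]; exact PySem.Set.nodup_ofList _
      rcases List.nodup_append.mp hnd with ⟨_, hndcw, hdisj⟩
      have hc'u : c' ∉ u := fun h => (hdisj c' h c' (by simp)) rfl
      have hc'w : c' ∉ w := (List.nodup_cons.mp hndcw).1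
      rw [hsplit]
      simp only [List.map_append, List.map_cons, List.sum_append, List.sum_cons,
        Function.comp_apply]
      have hu : u.map ((List.count (i : Int)) ∘ (fun c => pvPev [] (pvGrp cs (K + 1) c)))
          = u.map ((List.count (i : Int)) ∘ (fun c => pvPev [] (pvGrp cs K c))) := by
        refine List.map_congr_left ?_
        intro c hcu
        exact hFne c (fun h => hc'u (h ▸ hcu))
      have hw : w.map ((List.count (i : Int)) ∘ (fun c => pvPev [] (pvGrp cs (K + 1) c)))
          = w.map ((List.count (i : Int)) ∘ (fun c => pvPev [] (pvGrp cs K c))) := by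
        refine List.map_congr_left ?_
        intro c hcw
        exact hFne c (fun h => hc'w (h ▸ hcw))
      rw [hu, hw]
      rw [hF1]
      omega
    · rw [if_neg hmem]
      have hnew : (pvPev [] (pvGrp cs (K + 1) c')).count (i : Int) = 0 := by
        rw [pvGrp_succ]
        have hb : (cs.getD K ' ' == c') = true := by rw [← hc']; simp
        rw [hb, pvGrp_nil cs K hK' c' hmem]
        rfl
      have hcond : ¬ (i + 1 ≤ K ∧ cs.getD (K - i - 1) ' ' = c') := by
        rintro ⟨h1, h2⟩
        exact hmem (h2 ▸ pvGetD_mem_take cs K (K - i - 1) hK' (by omega))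
      rw [if_neg hcond]
      simp only [List.map_append, List.map_cons, List.map_nil, List.sum_append,
        List.sum_cons, List.sum_nil, Function.comp_apply]
      rw [hnew]
      have hall : (PySem.List.dedup (cs.take K)).map
            ((List.count (i : Int)) ∘ (fun c => pvPev [] (pvGrp cs (K + 1) c)))
          = (PySem.List.dedup (cs.take K)).map
            ((List.count (i : Int)) ∘ (fun c => pvPev [] (pvGrp cs K c))) := by
        refine List.map_congr_left ?_
        intro c hcmem
        refine hFne c ?_
        intro h
        exact hmem (by
          have : c ∈ cs.take K := (PySem.Set.mem_ofList _ _).mp hcmem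
          exact h ▸ this)
      rw [hall]
      omega


theorem pvE_nonneg (cs : List Char) (K : Nat) : ∀ e ∈ pvE cs K, 0 ≤ e := by
  intro e he
  unfold pvE at he
  rcases List.mem_flatMap.mp he with ⟨c, _, hc⟩
  exact pvPev_nonneg _ [] (by simp) (pvGrp_pairwise _ _ _) e hc

theorem pvB_clean (ciphertext : String) (L : Int) :
    get_coincidences_py_alt ciphertext L
    = pvScat (List.replicate (L - 1).toNat 0)
        (pvE ciphertext.toList (min L (ciphertext.toList.length : Int)).toNat) := by
  have hK : (min L ((ciphertext.toList.length : Nat) : Int)).toNat ≤ ciphertext.toList.length := by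
    omega
  simp only [get_coincidences_py_alt]
  rw [PySem.List.pyRepeat_singleton, PySem.List.len_eq, PySem.List.pyRange_one]
  simp only [sub_zero, zero_add]
  rw [pvDict_items ciphertext.toList (min L ((ciphertext.toList.length : Nat) : Int)).toNat hK]
  rw [pvOuter_eq]
  have hvals : (PySem.Dict.mk ((PySem.List.dedup
        (ciphertext.toList.take (min L ((ciphertext.toList.length : Nat) : Int)).toNat)).map
        (fun c => (c, pvGrp ciphertext.toList (min L ((ciphertext.toList.length : Nat) : Int)).toNat c)))).values
      = (PySem.List.dedup
        (ciphertext.toList.take (min L ((ciphertext.toList.length : Nat) : Int)).toNat)).map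
        (fun c => pvGrp ciphertext.toList (min L ((ciphertext.toList.length : Nat) : Int)).toNat c) := by
    unfold PySem.Dict.values
    rw [List.map_map]
    rfl
  rw [hvals, List.flatMap_map]
  rfl


theorem pvA_clean (ciphertext : String) (L : Int) (hL2 : 2 ≤ L)
    (hLn : L ≤ (ciphertext.toList.length : Int)) :
    get_coincidences_py ciphertext L
    = (List.range (L - 1).toNat).map (fun k =>
        (((List.range ((L - 1).toNat - k)).countP
            (fun j => ciphertext.toList.getD (j + k + 1) ' ' == ciphertext.toList.getD j ' ')) : Int)) := by
  have hn1 : 1 ≤ ciphertext.toList.length := by omega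
  simp only [get_coincidences_py]
  rw [PySem.List.pyRange_one]
  simp only [sub_zero, zero_add]
  rw [List.foldl_map, PySem.List.foldl_append_singleton_eq_map, List.nil_append]
  refine List.map_congr_left ?_
  intro k hk
  have hkm : k < (L - 1).toNat := List.mem_range.mp hk
  -- the slice bound L - 1 - k as a natural number
  have hb : L - 1 - (k : Int) = (((L - 1).toNat - k : Nat) : Int) := by omega
  have hslice : (PySem.Str.slice ciphertext none (some (L - 1 - (k : Int)))).toList
      = ciphertext.toList.take ((L - 1).toNat - k) := by
    rw [PySem.Str.toList_slice, hb]
    exact PySem.List.slice_to_natCast _ _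
  have hlen : PySem.Str.len (PySem.Str.slice ciphertext none (some (L - 1 - (k : Int))))
      = (((L - 1).toNat - k : Nat) : Int) := by
    rw [PySem.Str.len_eq, hslice, List.length_take]
    congr 1
    omega
  rw [hlen, PySem.List.pyRange_one]
  simp only [sub_zero, zero_add, Int.toNat_natCast]
  rw [List.foldl_map, PySem.List.foldl_if_add_one, zero_add]
  congr 1
  refine List.countP_congr ?_
  intro j hj
  have hjlt : j < (L - 1).toNat - k := List.mem_range.mp hj
  have hj1 : j + k + 1 < ciphertext.toList.length := by omega
  have hj2 : j < ciphertext.toList.length := by omega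
  have hcast : (j : Int) + (k : Int) + 1 = ((j + k + 1 : Nat) : Int) := by push_cast; ring
  rw [hcast, PySem.Str.pyGet?_natCast]
  have hcomp : PySem.Str.pyGet? (PySem.Str.slice ciphertext none (some (L - 1 - (k : Int)))) (j : Int)
      = ciphertext.toList[j]? := by
    rw [PySem.Str.pyGet?_natCast, hslice, List.getElem?_take, if_pos hjlt]
  rw [hcomp, List.getElem?_eq_getElem hj1, List.getElem?_eq_getElem hj2, Option.some_beq_some]
  rw [List.getD_eq_getElem _ _ hj1, List.getD_eq_getElem _ _ hj2]


theorem pvCnt_reindex (cs : List Char) (K i : Nat) :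
    pvCnt cs K i = (List.range (K - (i + 1))).countP
      (fun j => cs.getD (j + i + 1) ' ' == cs.getD j ' ') := by
  unfold pvCnt
  rcases Nat.lt_or_ge K (i + 1) with h | h
  · have h1 : K - (i + 1) = 0 := by omega
    rw [h1]
    simp only [List.range_zero, List.countP_nil]
    refine List.countP_eq_zero.mpr ?_
    intro q hq
    have : ¬ (i + 1 ≤ q) := by have := List.mem_range.mp hq; omega
    simp [this]
  · have h2 : K = (i + 1) + (K - (i + 1)) := by omega
    conv_lhs => rw [h2]
    rw [List.range_add, List.countP_append, List.countP_map]
    have hz : (List.range (i + 1)).countP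
        (fun q => decide (i + 1 ≤ q) && (cs.getD (q - i - 1) ' ' == cs.getD q ' ')) = 0 := by
      refine List.countP_eq_zero.mpr ?_
      intro q hq
      have : ¬ (i + 1 ≤ q) := by have := List.mem_range.mp hq; omega
      simp [this]
    rw [hz, Nat.zero_add]
    refine List.countP_congr ?_
    intro j _
    have e2 : i + 1 + j = j + i + 1 := by omega
    simp only [Function.comp_apply, e2]
    have h1 : i + 1 ≤ j + i + 1 := by omega
    have e3 : j + i + 1 - i - 1 = j := by omega
    simp only [h1, decide_true, Bool.true_and, e3, beq_iff_eq]
    exact eq_comm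

-- ===== VERDICT (by name: the statement is the Claim_ definition above) =====
theorem get_coincidences_py_spec : Claim_equal_get_coincidences_py := by
  intro ciphertext L hdom hpre
  unfold Spec_get_coincidences_py
  rw [pvB_clean]
  by_cases hL1 : L ≤ 1
  · have hA : get_coincidences_py ciphertext L = [] := by
      simp only [get_coincidences_py]
      rw [PySem.List.pyRange_one_eq_nil (by omega)]
      rfl
    have hB : pvScat (List.replicate (L - 1).toNat 0)
        (pvE ciphertext.toList (min L ((ciphertext.toList.length : Nat) : Int)).toNat) = [] := by
      refine List.length_eq_zero_iff.mp ?_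
      rw [pvScat_length, List.length_replicate]
      omega
    rw [hA, hB]
  · have hL2 : 2 ≤ L := by omega
    rcases Nat.eq_zero_or_pos ciphertext.toList.length with hn0 | hn1
    · -- empty ciphertext: A appends only zeros, B's histogram stays all-zero
      have hcs : ciphertext.toList = [] := List.length_eq_zero_iff.mp hn0
      have hKz : (min L ((ciphertext.toList.length : Nat) : Int)).toNat = 0 := by
        rw [hn0]; omega
      have hB : pvScat (List.replicate (L - 1).toNat 0)
          (pvE ciphertext.toList (min L ((ciphertext.toList.length : Nat) : Int)).toNat)
          = List.replicate (L - 1).toNat 0 := by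
        rw [hKz]
        rfl
      rw [hB]
      simp only [get_coincidences_py]
      rw [PySem.List.pyRange_one]
      simp only [sub_zero, zero_add]
      rw [List.foldl_map, PySem.List.foldl_append_singleton_eq_map, List.nil_append]
      have hbody : ∀ k ∈ List.range (L - 1).toNat,
          (PySem.List.pyRange 0 (PySem.Str.len
              (PySem.Str.slice ciphertext none (some (L - 1 - ((k : Nat) : Int))))) 1).foldl
            (fun acc j => if PySem.Str.pyGet? ciphertext (j + ((k : Nat) : Int) + 1) ==
                PySem.Str.pyGet? (PySem.Str.slice ciphertext none (some (L - 1 - ((k : Nat) : Int)))) j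
              then acc + 1 else acc) 0
          = (0 : Int) := by
        intro k hkmem
        have hk : k < (L - 1).toNat := List.mem_range.mp hkmem
        have hb : L - 1 - (k : Int) = (((L - 1).toNat - k : Nat) : Int) := by omega
        have hlen : PySem.Str.len (PySem.Str.slice ciphertext none (some (L - 1 - (k : Int)))) = 0 := by
          rw [PySem.Str.len_eq, PySem.Str.toList_slice, hb]
          rw [show PySem.Chars.slice ciphertext.toList none (some (((L - 1).toNat - k : Nat) : Int))
              = ciphertext.toList.take ((L - 1).toNat - k) from PySem.List.slice_to_natCast _ _]
          rw [hcs]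
          simp
        rw [hlen, PySem.List.pyRange_one_eq_nil (by omega)]
        rfl
      rw [List.map_congr_left hbody]
      simp [List.map_const', List.length_range]
    · -- the main case: 2 ≤ L ≤ length of the ciphertext
      have hLn : L ≤ ((ciphertext.toList.length : Nat) : Int) := by
        unfold Pre_get_coincidences_py at hpre
        rw [PySem.Str.len_eq] at hpre
        rcases hpre with h | h | h
        · omega
        · omega
        · exact h
      rw [pvA_clean ciphertext L hL2 hLn]
      have hKL : (min L ((ciphertext.toList.length : Nat) : Int)).toNat = L.toNat := by omega
      rw [hKL]
      refine List.ext_getElem ?_ ?_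
      · rw [List.length_map, List.length_range, pvScat_length, List.length_replicate]
      · intro i h1 h2
        rw [List.getElem_map, List.getElem_range]
        rw [pvScat_length, List.length_replicate] at h2
        rw [show (pvScat (List.replicate (L - 1).toNat 0) (pvE ciphertext.toList L.toNat))[i]'(by
              rw [pvScat_length, List.length_replicate]; exact h2)
            = (pvScat (List.replicate (L - 1).toNat 0) (pvE ciphertext.toList L.toNat)).getD i 0 from
          (List.getD_eq_getElem _ 0 (by rw [pvScat_length, List.length_replicate]; exact h2)).symm]
        rw [pvScat_getD _ _ (pvE_nonneg _ _) i (by rw [List.length_replicate]; exact h2)]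
        rw [pvE_count ciphertext.toList L.toNat (by omega) i, pvCnt_reindex]
        have hidx : L.toNat - (i + 1) = (L - 1).toNat - i := by omega
        rw [hidx]
        rw [List.getD_eq_getElem _ _ (by rw [List.length_replicate]; exact h2),
          List.getElem_replicate]
        rw [Int.zero_add]
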